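-- pv_equiv track=rewrite | github.com/qtgeo1248/AdventOfCode | 2021/Day23/b.py | possNextRoom
-- ===== SOURCE A (Python) =====
-- numFrogsPerRoom = 4
--
-- def getDest(typeFrog):
--     return 2 * (ord(typeFrog) - ord('A')) + 3
--
-- def possNextRoom(board, hallx, y, takenCoords, typeFrog):
--     poss = []
--     goRight = True
--     goLeft = True
--     for d in range(1, len(board[hallx])):
--         if (hallx, y + d) in takenCoords:
--             goRight = False
--         if (hallx, y - d) in takenCoords:
--             goLeft = False
--         if goRight and y + d == getDest(typeFrog):
--             poss.append(y + d)
--         if goLeft and y - d == getDest(typeFrog):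
--             poss.append(y - d)
--     newPoss = []
--     for newY in poss:
--         deepest = 0
--         deepness = 1
--         while deepness <= numFrogsPerRoom:
--             if (hallx + deepness, newY) not in takenCoords:
--                 deepest = deepness
--             deepness += 1
--         if deepest > 0:
--             newPoss.append((hallx + deepest, newY))
--     return newPoss
-- ===== SOURCE B (Python) =====
-- numFrogsPerRoom = 4
--
-- def getDest(typeFrog):
--     return 2 * (ord(typeFrog) - ord('A')) + 3
--
-- def possNextRoom(board, hallx, y, takenCoords, typeFrog):
--     dest = getDest(typeFrog)
--     delta = dest - y
--     step = 1 if delta > 0 else -1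
--     if not (1 <= abs(delta) < len(board[hallx])):
--         return []
--     if any((hallx, y + k * step) in takenCoords for k in range(1, abs(delta) + 1)):
--         return []
--     deepest = max((k for k in range(1, numFrogsPerRoom + 1)
--                    if (hallx + k, dest) not in takenCoords), default=0)
--     return [(hallx + deepest, dest)] if deepest > 0 else []
-- ===== Notes on version B (the rewrite author's own statement) =====
-- stated objective: simpler
-- what changed: Replaces A's flag-carrying scan over every hall distance (goRight/goLeft booleans updated at each d) by a direct check: compute dest and step, test the distance bound, walk exactly the cells from y to dest with any(), and take the deepest free room cell with max() over the depth range.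
-- outside the precondition, e.g. on possNextRoom([[0, 0]], 0, 0, {(0, 1), (0, -1)}, 'AB'): A returns [], B raises TypeError
import Mathlib
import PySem

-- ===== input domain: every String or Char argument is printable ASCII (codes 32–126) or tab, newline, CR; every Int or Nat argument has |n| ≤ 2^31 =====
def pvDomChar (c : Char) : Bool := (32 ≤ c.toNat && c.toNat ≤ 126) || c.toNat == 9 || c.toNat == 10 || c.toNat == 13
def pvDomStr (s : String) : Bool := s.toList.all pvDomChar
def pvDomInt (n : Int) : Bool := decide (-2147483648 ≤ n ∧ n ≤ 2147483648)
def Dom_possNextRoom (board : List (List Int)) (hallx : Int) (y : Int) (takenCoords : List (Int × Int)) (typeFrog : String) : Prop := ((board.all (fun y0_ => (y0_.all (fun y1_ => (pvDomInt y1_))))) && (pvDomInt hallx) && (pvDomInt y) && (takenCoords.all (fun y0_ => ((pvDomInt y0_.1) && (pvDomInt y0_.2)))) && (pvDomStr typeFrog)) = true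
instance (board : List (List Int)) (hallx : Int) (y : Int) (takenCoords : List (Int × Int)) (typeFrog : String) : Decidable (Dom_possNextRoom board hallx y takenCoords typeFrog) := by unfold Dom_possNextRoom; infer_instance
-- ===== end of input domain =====

-- B replaces A's flag-carrying scan over every hall distance by a direct walk to the destination
-- column plus a max over the depth range (objective: simpler); not claimed faster.

-- ===== PORT A =====
def numFrogsPerRoomL : Int := 4

def getDestPort (typeFrog : String) : Int :=
  2 * (((typeFrog.toList.headD 'A').toNat : Int) - 65) + 3

def pvStepA (hallx y dest : Int) (tk : List (Int × Int))
    (s : List Int × Bool × Bool) (d : Int) : List Int × Bool × Bool :=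
  let goRight := if tk.contains (hallx, y + d) then false else s.2.1
  let goLeft := if tk.contains (hallx, y - d) then false else s.2.2
  let poss := if goRight && (y + d == dest) then s.1 ++ [y + d] else s.1
  let poss2 := if goLeft && (y - d == dest) then poss ++ [y - d] else poss
  (poss2, goRight, goLeft)

def pvDeepA (hallx : Int) (tk : List (Int × Int)) (newY : Int) : Int :=
  (PySem.List.pyRange 1 (numFrogsPerRoomL + 1) 1).foldl
    (fun deepest deepness => if !(tk.contains (hallx + deepness, newY)) then deepness else deepest) 0

def possNextRoom (board : List (List Int)) (hallx : Int) (y : Int) (takenCoords : List (Int × Int)) (typeFrog : String) : List (Int × Int) :=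
  let row := (PySem.List.pyGet? board hallx).getD []
  let st := (PySem.List.pyRange 1 (row.length : Int) 1).foldl
    (pvStepA hallx y (getDestPort typeFrog) takenCoords) ([], true, true)
  st.1.foldl (fun newPoss newY =>
    let deepest := pvDeepA hallx takenCoords newY
    if 0 < deepest then newPoss ++ [(hallx + deepest, newY)] else newPoss) []

-- ===== PORT B =====
def pvDeepB (hallx dest : Int) (tk : List (Int × Int)) : Int :=
  (PySem.List.pyRange 1 (numFrogsPerRoomL + 1) 1).foldl
    (fun m k => if !(tk.contains (hallx + k, dest)) then max m k else m) 0

def possNextRoom_alt (board : List (List Int)) (hallx : Int) (y : Int) (takenCoords : List (Int × Int)) (typeFrog : String) : List (Int × Int) :=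
  let dest := getDestPort typeFrog
  let delta := dest - y
  let step : Int := if 0 < delta then 1 else -1
  let row := (PySem.List.pyGet? board hallx).getD []
  if ¬ (1 ≤ |delta| ∧ |delta| < (row.length : Int)) then []
  else if (PySem.List.pyRange 1 (|delta| + 1) 1).any (fun k => takenCoords.contains (hallx, y + k * step)) then []
  else
    let deepest := pvDeepB hallx dest takenCoords
    if 0 < deepest then [(hallx + deepest, dest)] else []

-- ===== PRECONDITION & SPEC =====
-- Pre_ excludes inputs on which Python A raises: an out-of-range hallx (IndexError) and a
-- typeFrog that is not a single character (ord raises TypeError); on the latter A still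
-- returns [] when both adjacent hall cells are blocked (getDest is short-circuited away),
-- but B calls getDest unconditionally and raises there too.
def Pre_possNextRoom (board : List (List Int)) (hallx : Int) (y : Int) (takenCoords : List (Int × Int)) (typeFrog : String) : Prop :=
  PySem.Raise.InRange board.length hallx ∧ typeFrog.length = 1
instance (board : List (List Int)) (hallx : Int) (y : Int) (takenCoords : List (Int × Int)) (typeFrog : String) : Decidable (Pre_possNextRoom board hallx y takenCoords typeFrog) := by unfold Pre_possNextRoom; infer_instance

def pvWitness_possNextRoom : List (List Int) × Int × Int × (List (Int × Int)) × String :=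
  ([[0, 0, 0], [0]], 0, 1, [], "A")

def Spec_possNextRoom (board : List (List Int)) (hallx : Int) (y : Int) (takenCoords : List (Int × Int)) (typeFrog : String) (out : List (Int × Int)) : Prop := out = possNextRoom_alt board hallx y takenCoords typeFrog
instance (board : List (List Int)) (hallx : Int) (y : Int) (takenCoords : List (Int × Int)) (typeFrog : String) (out : List (Int × Int)) : Decidable (Spec_possNextRoom board hallx y takenCoords typeFrog out) := by unfold Spec_possNextRoom; infer_instance

-- ===== CLAIM (what is proved, stated in full; the proofs are below) =====
def Claim_equal_possNextRoom : Prop := ∀ (board : List (List Int)) (hallx : Int) (y : Int) (takenCoords : List (Int × Int)) (typeFrog : String), Dom_possNextRoom board hallx y takenCoords typeFrog → Pre_possNextRoom board hallx y takenCoords typeFrog → Spec_possNextRoom board hallx y takenCoords typeFrog (possNextRoom board hallx y takenCoords typeFrog)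

-- ===== LEMMAS AND PROOFS =====
def pvFreeR (hallx y : Int) (tk : List (Int × Int)) (n : Int) : Bool :=
  (PySem.List.pyRange 1 n 1).all (fun d => !(tk.contains (hallx, y + d)))

def pvFreeL (hallx y : Int) (tk : List (Int × Int)) (n : Int) : Bool :=
  (PySem.List.pyRange 1 n 1).all (fun d => !(tk.contains (hallx, y - d)))

def pvP (hallx y dest : Int) (tk : List (Int × Int)) (n : Int) : List Int :=
  if 1 ≤ dest - y ∧ dest - y < n ∧ pvFreeR hallx y tk (dest - y + 1) = true then [dest]
  else if 1 ≤ y - dest ∧ y - dest < n ∧ pvFreeL hallx y tk (y - dest + 1) = true then [dest]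
  else []

theorem pvLoopA_inv (hallx y dest : Int) (tk : List (Int × Int)) (n : ℕ) :
    (PySem.List.pyRange 1 (n : Int) 1).foldl (pvStepA hallx y dest tk) ([], true, true)
      = (pvP hallx y dest tk n, pvFreeR hallx y tk n, pvFreeL hallx y tk n) := by
  induction n with
  | zero =>
      rw [PySem.List.pyRange_one_eq_nil (by norm_num)]
      unfold pvP pvFreeR pvFreeL
      rw [if_neg (by rintro ⟨h1, h2, -⟩; omega), if_neg (by rintro ⟨h1, h2, -⟩; omega)]
      rw [PySem.List.pyRange_one_eq_nil (by norm_num)]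
      simp [List.foldl]
  | succ n ih =>
      by_cases hn : 1 ≤ (n : Int)
      · have hsplit : PySem.List.pyRange 1 ((n + 1 : ℕ) : Int) 1
            = PySem.List.pyRange 1 (n : Int) 1 ++ [(n : Int)] := by
          push_cast
          exact PySem.List.pyRange_one_succ_right hn
        rw [hsplit, List.foldl_append, ih]
        have hfR : pvFreeR hallx y tk ((n : Int) + 1)
            = (pvFreeR hallx y tk (n : Int) && !(tk.contains (hallx, y + (n : Int)))) := by
          unfold pvFreeR
          rw [PySem.List.pyRange_one_succ_right hn, List.all_append]
          simp
        have hfL : pvFreeL hallx y tk ((n : Int) + 1)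
            = (pvFreeL hallx y tk (n : Int) && !(tk.contains (hallx, y - (n : Int)))) := by
          unfold pvFreeL
          rw [PySem.List.pyRange_one_succ_right hn, List.all_append]
          simp
        have hcast : (((n + 1 : ℕ) : Int)) = (n : Int) + 1 := by push_cast; ring
        rw [hcast]
        simp only [List.foldl, pvStepA]
        by_cases hR : y + (n : Int) = dest
        · have hdy : dest - y = (n : Int) := by omega
          have hPn : pvP hallx y dest tk (n : Int) = [] := by
            unfold pvP
            rw [if_neg (by rintro ⟨h1, h2, -⟩; omega), if_neg (by rintro ⟨h1, h2, -⟩; omega)]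
          have hL : ¬ (y - (n : Int) = dest) := by omega
          have hP1 : pvP hallx y dest tk ((n : Int) + 1)
              = if pvFreeR hallx y tk ((n : Int) + 1) = true then [dest] else [] := by
            unfold pvP
            rw [hdy]
            by_cases hfree : pvFreeR hallx y tk ((n : Int) + 1) = true
            · rw [if_pos ⟨hn, by omega, hfree⟩, if_pos hfree]
            · rw [if_neg (by rintro ⟨-, -, h⟩; exact hfree h), if_neg hfree,
                  if_neg (by rintro ⟨h1, -, -⟩; omega)]
          rw [hP1, hPn, hfR, hfL]
          by_cases hc : tk.contains (hallx, y + (n : Int)) = true <;>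
            by_cases hc2 : tk.contains (hallx, y - (n : Int)) = true <;>
              simp [hR, hL, Bool.and_comm]
        · by_cases hLe : y - (n : Int) = dest
          · have hdy : dest - y = -(n : Int) := by omega
            have hPn : pvP hallx y dest tk (n : Int) = [] := by
              unfold pvP
              rw [if_neg (by rintro ⟨h1, h2, -⟩; omega), if_neg (by rintro ⟨h1, h2, -⟩; omega)]
            have hP1 : pvP hallx y dest tk ((n : Int) + 1)
                = if pvFreeL hallx y tk ((n : Int) + 1) = true then [dest] else [] := by
              unfold pvP
              have hyd : y - dest = (n : Int) := by omega
              rw [hyd]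
              by_cases hfree : pvFreeL hallx y tk ((n : Int) + 1) = true
              · rw [if_neg (by rintro ⟨h1, -, -⟩; omega), if_pos ⟨hn, by omega, hfree⟩, if_pos hfree]
              · rw [if_neg (by rintro ⟨h1, -, -⟩; omega), if_neg (by rintro ⟨-, -, h⟩; exact hfree h),
                    if_neg hfree]
            rw [hP1, hPn, hfR, hfL]
            by_cases hc : tk.contains (hallx, y + (n : Int)) = true <;>
              by_cases hc2 : tk.contains (hallx, y - (n : Int)) = true <;>
                simp [hR, hLe, Bool.and_comm]
          · have hPeq : pvP hallx y dest tk ((n : Int) + 1) = pvP hallx y dest tk (n : Int) := by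
              unfold pvP
              have e1 : (1 ≤ dest - y ∧ dest - y < (n : Int) + 1 ∧ pvFreeR hallx y tk (dest - y + 1) = true)
                  ↔ (1 ≤ dest - y ∧ dest - y < (n : Int) ∧ pvFreeR hallx y tk (dest - y + 1) = true) := by
                constructor <;> rintro ⟨a, b, c⟩ <;> exact ⟨a, by omega, c⟩
              have e2 : (1 ≤ y - dest ∧ y - dest < (n : Int) + 1 ∧ pvFreeL hallx y tk (y - dest + 1) = true)
                  ↔ (1 ≤ y - dest ∧ y - dest < (n : Int) ∧ pvFreeL hallx y tk (y - dest + 1) = true) := by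
                constructor <;> rintro ⟨a, b, c⟩ <;> exact ⟨a, by omega, c⟩
              rw [if_congr e1 rfl rfl, if_congr e2 rfl rfl]
            rw [hPeq, hfR, hfL]
            by_cases hc : tk.contains (hallx, y + (n : Int)) = true <;>
              by_cases hc2 : tk.contains (hallx, y - (n : Int)) = true <;>
                simp [hR, hLe, Bool.and_comm]
      · have hn0 : n = 0 := by omega
        subst hn0
        rw [PySem.List.pyRange_one_eq_nil (by norm_num)]
        unfold pvP pvFreeR pvFreeL
        rw [if_neg (by rintro ⟨h1, h2, -⟩; omega), if_neg (by rintro ⟨h1, h2, -⟩; omega)]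
        rw [PySem.List.pyRange_one_eq_nil (by norm_num)]
        simp [List.foldl]

theorem pvDeep_eq (hallx z : Int) (tk : List (Int × Int)) :
    pvDeepA hallx tk z = pvDeepB hallx z tk := by
  have h : PySem.List.pyRange 1 (numFrogsPerRoomL + 1) 1 = [1, 2, 3, 4] := by decide
  unfold pvDeepA pvDeepB
  rw [h]
  simp only [List.foldl]
  split_ifs <;> decide

theorem pvMain (board : List (List Int)) (hallx y : Int) (tk : List (Int × Int)) (tf : String) :
    possNextRoom board hallx y tk tf = possNextRoom_alt board hallx y tk tf := by
  simp only [possNextRoom, possNextRoom_alt]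
  rw [pvLoopA_inv]
  set dest := getDestPort tf with hdest
  set L := (((PySem.List.pyGet? board hallx).getD ([] : List Int)).length : Int) with hLdef
  rcases lt_trichotomy (dest - y) 0 with hneg | hzero | hpos
  · -- dest left of y
    have habs : |dest - y| = y - dest := by rw [abs_of_neg hneg]; ring
    have hstep : (if 0 < dest - y then (1 : Int) else -1) = -1 := if_neg (by omega)
    rw [hstep, habs]
    have hfun : (fun k => tk.contains (hallx, y + k * -1)) = (fun k => tk.contains (hallx, y - k)) := by
      funext k; ring_nf
    rw [hfun]
    have hany : ((PySem.List.pyRange 1 (y - dest + 1) 1).any fun k => tk.contains (hallx, y - k))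
        = !(pvFreeL hallx y tk (y - dest + 1)) := by
      simp [pvFreeL, List.all_eq_not_any_not]
    by_cases hlt : y - dest < L
    · rw [if_neg (by push_neg; constructor <;> omega)]
      rw [hany]
      by_cases hfree : pvFreeL hallx y tk (y - dest + 1) = true
      · rw [hfree]
        rw [pvP, if_neg (by rintro ⟨h1, -, -⟩; omega), if_pos ⟨by omega, hlt, hfree⟩]
        simp [List.foldl, pvDeep_eq]
      · rw [pvP, if_neg (by rintro ⟨h1, -, -⟩; omega), if_neg (by rintro ⟨-, -, h⟩; exact hfree h)]
        simp only [List.foldl]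
        rw [if_pos (by simp [Bool.eq_false_iff.mpr] at hfree ⊢; simp [hfree])]
    · rw [pvP, if_neg (by rintro ⟨h1, -, -⟩; omega), if_neg (by rintro ⟨-, h2, -⟩; omega),
          if_pos (by rintro ⟨h1, h2⟩; omega)]
      simp [List.foldl]
  · -- dest = y
    have habs0 : |dest - y| = 0 := by rw [hzero]; exact abs_zero
    rw [pvP, if_neg (by rintro ⟨h1, -, -⟩; omega), if_neg (by rintro ⟨h1, -, -⟩; omega),
        if_pos (by rintro ⟨h1, h2⟩; omega)]
    simp [List.foldl]
  · -- dest right of y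
    have habs : |dest - y| = dest - y := abs_of_pos hpos
    have hstep : (if 0 < dest - y then (1 : Int) else -1) = 1 := if_pos hpos
    rw [hstep, habs]
    have hfun : (fun k => tk.contains (hallx, y + k * 1)) = (fun k => tk.contains (hallx, y + k)) := by
      funext k; ring_nf
    rw [hfun]
    have hany : ((PySem.List.pyRange 1 (dest - y + 1) 1).any fun k => tk.contains (hallx, y + k))
        = !(pvFreeR hallx y tk (dest - y + 1)) := by
      simp [pvFreeR, List.all_eq_not_any_not]
    by_cases hlt : dest - y < L
    · rw [if_neg (by push_neg; constructor <;> omega)]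
      rw [hany]
      by_cases hfree : pvFreeR hallx y tk (dest - y + 1) = true
      · rw [hfree]
        rw [pvP, if_pos ⟨by omega, hlt, hfree⟩]
        simp [List.foldl, pvDeep_eq]
      · rw [pvP, if_neg (by rintro ⟨-, -, h⟩; exact hfree h), if_neg (by rintro ⟨h1, -, -⟩; omega)]
        simp only [List.foldl]
        rw [if_pos (by simp [Bool.eq_false_iff.mpr] at hfree ⊢; simp [hfree])]
    · rw [pvP, if_neg (by rintro ⟨-, h2, -⟩; omega), if_neg (by rintro ⟨h1, -, -⟩; omega),
          if_pos (by rintro ⟨h1, h2⟩; omega)]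
      simp [List.foldl]

-- ===== VERDICT (by name: the statement is the Claim_ definition above) =====
theorem possNextRoom_spec : Claim_equal_possNextRoom := by
  intro board hallx y tk tf _ _
  exact pvMain board hallx y tk tf
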